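-- pv_equiv track=rewrite | github.com/MashMozh/practice_14 | task_12.py | hole_or_not
-- ===== SOURCE A (Python) =====
-- def hole_or_not(words: list[str]) -> tuple[int, int]:
--     """
--     Counts the number of letters with and without holes
--     in a list of words.
--
--     Args:
--         words (list[str]): List of lowercase words.
--
--     Returns:
--         tuple[int, int]: A tuple containing two numbers:
--             - count of letters with holes
--             - count of letters without holes
--     """
--
--     holes = {'a', 'b', 'd', 'e', 'g', 'o', 'p', 'q'}
--     letters_with_hole = 0
--     letters_without_hole = 0
--
--     for word in words:
--         for letter in word:
--             if letter in holes:
--                 letters_with_hole += 1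
--             else:
--                 letters_without_hole += 1
--
--     return letters_with_hole, letters_without_hole
-- ===== SOURCE B (Python) =====
-- def hole_or_not(words: list[str]) -> tuple[int, int]:
--     """Frequency-table approach: histogram every character once, then read the
--     eight hole letters off the table; without-holes is the remaining mass."""
--     freq = {}
--     for w in words:
--         for ch in w:
--             freq[ch] = freq.get(ch, 0) + 1
--     with_holes = sum(freq.get(c, 0) for c in 'abdegopq')
--     total = sum(freq.values())
--     return (with_holes, total - with_holes)
-- ===== Notes on version B (the rewrite author's own statement) =====
-- stated objective: alternative
-- what changed: B builds a character-frequency table (histogram) in a counting pass with no hole test, then obtains the with-holes count by eight table lookups and the without-holes count as the table's total mass minus it, instead of A's single pass testing every character against the hole set and maintaining two branching counters.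
import Mathlib
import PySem

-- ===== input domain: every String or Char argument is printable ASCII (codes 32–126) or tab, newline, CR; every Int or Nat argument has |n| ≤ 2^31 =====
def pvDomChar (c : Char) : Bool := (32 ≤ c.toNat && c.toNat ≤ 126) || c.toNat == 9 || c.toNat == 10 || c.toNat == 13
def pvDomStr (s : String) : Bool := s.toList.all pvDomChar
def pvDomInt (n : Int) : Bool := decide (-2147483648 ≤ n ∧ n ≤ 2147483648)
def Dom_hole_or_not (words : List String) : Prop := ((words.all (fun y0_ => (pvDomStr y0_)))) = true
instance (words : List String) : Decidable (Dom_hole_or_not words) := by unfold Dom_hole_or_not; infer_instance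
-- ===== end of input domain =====

-- B replaces A's branching two-counter pass by a character-frequency table read off at the end;
-- same result, alternative algorithm (no speed claim).

-- ===== PORT A =====
-- the set literal {'a','b','d','e','g','o','p','q'}
def holesSetA : List Char := PySem.Set.ofList ['a', 'b', 'd', 'e', 'g', 'o', 'p', 'q']

def hole_or_not (words : List String) : Int × Int :=
  words.foldl
    (fun st word =>
      word.toList.foldl
        (fun st letter =>
          if letter ∈ holesSetA then (st.1 + 1, st.2) else (st.1, st.2 + 1))
        st)
    (0, 0)

-- ===== PORT B =====
def hole_or_not_alt (words : List String) : Int × Int :=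
  let freq : PySem.Dict Char Int :=
    words.foldl
      (fun d w => w.toList.foldl (fun d ch => d.insert ch (d.getD ch 0 + 1)) d)
      PySem.Dict.empty
  let with_holes : Int := ("abdegopq".toList.map (fun c => freq.getD c 0)).sum
  let total : Int := freq.values.sum
  (with_holes, total - with_holes)

-- ===== PRECONDITION & SPEC =====
def Spec_hole_or_not (words : List String) (out : Int × Int) : Prop := out = hole_or_not_alt words
instance (words : List String) (out : Int × Int) : Decidable (Spec_hole_or_not words out) := by unfold Spec_hole_or_not; infer_instance

-- ===== CLAIM (what is proved, stated in full; the proofs are below) =====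
def Claim_equal_hole_or_not : Prop := ∀ (words : List String), Dom_hole_or_not words → Spec_hole_or_not words (hole_or_not words)

-- ===== LEMMAS AND PROOFS =====

-- the characters of all words, in order
def allChars (words : List String) : List Char := words.flatMap String.toList

-- A's nested fold, computed on the flattened character list
lemma aLoop (cs : List Char) (x y : Int) :
    cs.foldl (fun st letter =>
        if letter ∈ holesSetA then (st.1 + 1, st.2) else (st.1, st.2 + 1)) (x, y)
      = (x + (cs.countP (fun c => decide (c ∈ holesSetA)) : Int),
         y + (cs.countP (fun c => !decide (c ∈ holesSetA)) : Int)) := by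
  induction cs generalizing x y with
  | nil => simp
  | cons c cs ih =>
    by_cases h : c ∈ holesSetA <;>
      simp [List.foldl, h, ih] <;> ring_nf

-- nesting a fold over the words is the fold over the flattened characters
lemma foldl_words {σ : Type} (f : σ → Char → σ) (words : List String) (init : σ) :
    words.foldl (fun s w => w.toList.foldl f s) init
      = (allChars words).foldl f init := by
  induction words generalizing init with
  | nil => simp [allChars]
  | cons w ws ih => simp [allChars, List.foldl, ih, List.foldl_append]

-- summing "1 if k = c else 0" over a list is counting c (Prop-ite bridge)
lemma sum_ite_eq_count (ks : List Char) (c : Char) :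
    (ks.map (fun k => if k = c then (1:Int) else 0)).sum = (ks.count c : Int) := by
  induction ks with
  | nil => simp
  | cons k ks ih =>
    rw [List.map_cons, List.sum_cons, ih, List.count_cons]
    by_cases h : k = c
    · subst h; simp; ring
    · simp [h]

-- one cons step of List.count, over Int
lemma count_cons_int (cs : List Char) (c k : Char) :
    ((c :: cs).count k : Int) = (cs.count k : Int) + (if k = c then (1:Int) else 0) := by
  rw [List.count_cons]
  by_cases h : k = c
  · subst h; simp
  · simp [h, Ne.symm h]

-- summing the counts over a nodup list containing every character gives the length
lemma sum_count_mem {cs : List Char} (ks : List Char) (hnd : ks.Nodup)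
    (hmem : ∀ x ∈ cs, x ∈ ks) :
    (ks.map (fun k => (cs.count k : Int))).sum = (cs.length : Int) := by
  induction cs with
  | nil => simp
  | cons c cs ih =>
    have hc : c ∈ ks := hmem c (List.mem_cons_self)
    have hsum : (ks.map (fun k => (cs.count k : Int))).sum = (cs.length : Int) :=
      ih (fun x hx => hmem x (List.mem_cons_of_mem _ hx))
    have hone : (ks.map (fun k => (if k = c then (1:Int) else 0))).sum = 1 := by
      rw [sum_ite_eq_count, List.count_eq_one_of_mem hnd hc]; simp
    calc (ks.map (fun k => ((c :: cs).count k : Int))).sum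
        = (ks.map (fun k => (cs.count k : Int) + (if k = c then (1:Int) else 0))).sum := by
          exact congrArg _ (List.map_congr_left (fun k _ => count_cons_int cs c k))
      _ = (ks.map (fun k => (cs.count k : Int))).sum
          + (ks.map (fun k => (if k = c then (1:Int) else 0))).sum := by
          rw [PySem.List.sum_map_add_int]
      _ = (cs.length : Int) + 1 := by rw [hsum, hone]
      _ = ((c :: cs).length : Int) := by simp
  
-- summing the counts of a nodup key list is counting membership in that list
lemma sum_count_filter {cs : List Char} (H : List Char) (hnd : H.Nodup) :
    (H.map (fun c => (cs.count c : Int))).sum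
      = (cs.countP (fun c => decide (c ∈ H)) : Int) := by
  induction cs with
  | nil => simp
  | cons c cs ih =>
    have hone : (H.map (fun k => (if k = c then (1:Int) else 0))).sum
        = (if c ∈ H then (1:Int) else 0) := by
      rw [sum_ite_eq_count]
      by_cases h : c ∈ H
      · simp [h, List.count_eq_one_of_mem hnd h]
      · simp [h, List.count_eq_zero_of_not_mem h]
    have hsplit : (H.map (fun k => ((c :: cs).count k : Int))).sum
        = (H.map (fun k => (cs.count k : Int))).sum
          + (H.map (fun k => (if k = c then (1:Int) else 0))).sum := by
      rw [← PySem.List.sum_map_add_int]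
      exact congrArg _ (List.map_congr_left (fun k _ => count_cons_int cs c k))
    rw [hsplit, ih, hone, List.countP_cons]
    by_cases h : c ∈ H <;> simp [h]

-- count with-holes plus count without-holes is the length
lemma countP_split (cs : List Char) (p : Char → Bool) :
    (cs.countP p : Int) + (cs.countP (fun c => !p c) : Int) = (cs.length : Int) := by
  induction cs with
  | nil => simp
  | cons c cs ih =>
    rw [List.countP_cons, List.countP_cons]
    by_cases h : p c <;> simp [h] <;> omega

-- ===== VERDICT (by name: the statement is the Claim_ definition above) =====
theorem hole_or_not_spec : Claim_equal_hole_or_not := by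
  intro words _
  show hole_or_not words = hole_or_not_alt words
  unfold hole_or_not hole_or_not_alt
  rw [foldl_words, foldl_words, aLoop]
  rw [PySem.Dict.foldl_insert_getD_add_one_eq_counter]
  set cs := allChars words with hcs
  have hvals : (PySem.Dict.counter cs).values = (PySem.Set.ofList cs).map (fun k => (cs.count k : Int)) := by
    have := PySem.Dict.items_counter (xs := cs)
    simp [PySem.Dict.values, this, Function.comp]
  have htotal : ((PySem.Dict.counter cs).values).sum = (cs.length : Int) := by
    rw [hvals]
    exact sum_count_mem _ (PySem.Set.nodup_ofList cs)
      (fun x hx => (PySem.Set.mem_ofList cs x).mpr hx)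
  have hwh : ("abdegopq".toList.map (fun c => (PySem.Dict.counter cs).getD c 0)).sum
      = (cs.countP (fun c => decide (c ∈ holesSetA)) : Int) := by
    have h1 : ("abdegopq".toList.map (fun c => (PySem.Dict.counter cs).getD c 0)).sum
        = ("abdegopq".toList.map (fun c => (cs.count c : Int))).sum := by
      apply congrArg; apply List.map_congr_left
      intro c _; rw [PySem.Dict.getD_counter]
    have hHA : "abdegopq".toList = holesSetA := by decide
    rw [h1, sum_count_filter _ (by decide), hHA]
  simp only [hwh, htotal]
  rw [Prod.mk.injEq]
  constructor
  · ring
  · rw [← countP_split cs (fun c => decide (c ∈ holesSetA))]; ring
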